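-- pv_equiv track=rewrite | github.com/EthanFusion03/CSE-158-Assignment1 | assignment1.py | threshold_predictions
-- ===== SOURCE A (Python) =====
-- from collections import defaultdict
--
-- def threshold_predictions(pairs, scores):
--     predictions = {}
--     user_to_scores = defaultdict(list)
--     for (user, book), score in zip(pairs, scores):
--         user_to_scores[user].append((book, score))
--     for user, items in user_to_scores.items():
--         items.sort(key=lambda x: x[1], reverse=True)
--         threshold_score = items[len(items) // 2][1]
--         for book, score in items:
--             predictions[(user, book)] = int(score > threshold_score)
--     return predictions
-- ===== SOURCE B (Python) =====
-- def threshold_predictions(pairs, scores):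
--     # Online insertion: keep each user's (book, score) list sorted by descending
--     # score at all times (stable: ties go after earlier-inserted equals), so no
--     # sort call is ever needed; then emit all predictions as one flat list and
--     # build the dict in a single constructor call.
--     groups = {}
--     for (user, book), score in zip(pairs, scores):
--         items = groups.setdefault(user, [])
--         j = 0
--         while j < len(items) and items[j][1] >= score:
--             j += 1
--         items.insert(j, (book, score))
--     out = []
--     for user, items in groups.items():
--         threshold = items[len(items) // 2][1]
--         for book, score in items:
--             out.append(((user, book), int(score > threshold)))
--     return dict(out)
-- ===== Notes on version B (the rewrite author's own statement) =====
-- stated objective: alternative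
-- what changed: B never calls sort: it maintains each user's (book,score) list in descending-score order by online insertion as pairs stream in (stable: equal scores go after earlier arrivals, matching Python's stable sort), then emits all predictions as one flat list and builds the result dict in a single dict() call instead of per-item dict writes.
import Mathlib
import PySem

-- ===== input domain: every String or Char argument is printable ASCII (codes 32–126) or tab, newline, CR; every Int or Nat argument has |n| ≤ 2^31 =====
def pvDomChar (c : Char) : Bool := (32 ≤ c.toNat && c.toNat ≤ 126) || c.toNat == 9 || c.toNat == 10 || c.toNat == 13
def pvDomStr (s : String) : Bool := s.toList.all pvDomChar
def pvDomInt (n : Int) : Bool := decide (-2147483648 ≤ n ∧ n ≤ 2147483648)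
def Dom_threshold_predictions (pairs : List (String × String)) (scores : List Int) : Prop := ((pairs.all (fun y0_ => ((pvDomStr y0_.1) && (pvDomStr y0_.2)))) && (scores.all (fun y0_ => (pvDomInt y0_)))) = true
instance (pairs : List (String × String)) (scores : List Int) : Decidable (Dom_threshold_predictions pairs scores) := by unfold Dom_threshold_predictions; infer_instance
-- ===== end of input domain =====

-- B replaces A's sort-at-the-end per user by ONLINE insertion (each user's list is kept in
-- descending-score order as the pairs stream in; no sort call) and builds the result dict in
-- one dict() constructor from a flat list instead of per-item dict writes (objective:
-- alternative, not faster). The equivalence proved is exact, including dict insertion order.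

-- ===== PORT A =====
-- (the pyGetD default ("", 0) is never used: each grouped items list is nonempty, so
--  items[len(items)//2] is always in range and Python never raises here)
def threshold_predictions (pairs : List (String × String)) (scores : List Int) : List (String × String × Int) :=
  let user_to_scores : PySem.Dict String (List (String × Int)) :=
    (pairs.zip scores).foldl
      (fun d x => d.modify x.1.1 [] (fun l => l ++ [(x.1.2, x.2)])) PySem.Dict.empty
  let predictions : PySem.Dict (String × String) Int :=
    user_to_scores.items.foldl
      (fun pred ui =>
        let items := PySem.List.sorted ui.2 (fun x => x.2) true
        let threshold : Int := (PySem.List.pyGetD items (PySem.Int.floordiv (items.length : Int) 2) ("", 0)).2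
        items.foldl (fun pred bs => pred.insert (ui.1, bs.1) (if threshold < bs.2 then (1:Int) else 0)) pred)
      PySem.Dict.empty
  predictions.items.map (fun p => (p.1.1, p.1.2, p.2))

-- ===== PORT B =====
-- the while loop 'j = 0; while j < len(items) and items[j][1] >= score: j += 1'
def pvInsPos : List (String × Int) → Int → Nat
  | [], _ => 0
  | it :: rest, s => if s ≤ it.2 then pvInsPos rest s + 1 else 0

-- (same remark: each group value is nonempty when read back, so items[len(items)//2]
--  is in range and the getD default ("", 0) is never used)
def threshold_predictions_alt (pairs : List (String × String)) (scores : List Int) : List (String × String × Int) :=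
  let groups : PySem.Dict String (List (String × Int)) :=
    (pairs.zip scores).foldl
      (fun g x => g.modify x.1.1 []
        (fun items => PySem.List.insert items ((pvInsPos items x.2 : Nat) : Int) (x.1.2, x.2)))
      PySem.Dict.empty
  let out : List ((String × String) × Int) :=
    groups.items.foldl
      (fun out ui =>
        let threshold : Int := (ui.2.getD (ui.2.length / 2) ("", 0)).2
        ui.2.foldl (fun out bs => out ++ [((ui.1, bs.1), if threshold < bs.2 then (1:Int) else 0)]) out)
      []
  (PySem.Dict.ofList out).items.map (fun p => (p.1.1, p.1.2, p.2))

-- ===== PRECONDITION & SPEC =====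
def Spec_threshold_predictions (pairs : List (String × String)) (scores : List Int) (out : List (String × String × Int)) : Prop := out = threshold_predictions_alt pairs scores
instance (pairs : List (String × String)) (scores : List Int) (out : List (String × String × Int)) : Decidable (Spec_threshold_predictions pairs scores out) := by unfold Spec_threshold_predictions; infer_instance

-- ===== CLAIM (what is proved, stated in full; the proofs are below) =====
def Claim_equal_threshold_predictions : Prop := ∀ (pairs : List (String × String)) (scores : List Int), Dom_threshold_predictions pairs scores → Spec_threshold_predictions pairs scores (threshold_predictions pairs scores)

-- ===== LEMMAS AND PROOFS =====

-- the insertion position never passes the end of the list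
theorem pvInsPos_le (items : List (String × Int)) (s : Int) : pvInsPos items s ≤ items.length := by
  induction items with
  | nil => simp [pvInsPos]
  | cons it rest ih =>
    by_cases h : s ≤ it.2
    · simp [pvInsPos, h]; omega
    · simp [pvInsPos, h]

-- B's hand-written positional insert IS the stable descending insertBy of the sort library
theorem pv_insert_eq_insertBy (items : List (String × Int)) (b : String) (s : Int) :
    PySem.List.insert items ((pvInsPos items s : Nat) : Int) (b, s)
      = PySem.List.insertBy (fun a c => decide (c.2 < a.2)) (b, s) items := by
  rw [PySem.List.insert_natCast items (pvInsPos items s) (b, s) (pvInsPos_le items s)]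
  induction items with
  | nil => rfl
  | cons it rest ih =>
    by_cases h : s ≤ it.2
    · have hlt : ¬ it.2 < s := by omega
      simp [pvInsPos, PySem.List.insertBy, h, hlt, ih]
    · have hlt : it.2 < s := by omega
      simp [pvInsPos, PySem.List.insertBy, h, hlt]

-- folding B's online insertion over a stream builds exactly the stable descending sort
theorem pv_foldl_step_eq_sorted (s : List (String × Int)) :
    s.foldl (fun v y => PySem.List.insert v ((pvInsPos v y.2 : Nat) : Int) (y.1, y.2)) []
      = PySem.List.sorted s (fun x => x.2) true := by
  rw [PySem.List.sorted_rev_eq_foldl_insertBy]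
  have hf : (fun (v : List (String × Int)) (y : String × Int) =>
        PySem.List.insert v ((pvInsPos v y.2 : Nat) : Int) (y.1, y.2))
      = (fun acc y => PySem.List.insertBy (fun a c => decide (c.2 < a.2)) y acc) := by
    funext v y
    rw [pv_insert_eq_insertBy v y.1 y.2]
  rw [hf]

-- a grouping fold with a per-element step, read back at one key: the step folded
-- over exactly that key's subsequence of the stream
theorem pv_getD_foldl_modify_step (l : List (String × (String × Int)))
    (step : List (String × Int) → (String × Int) → List (String × Int))
    (d : PySem.Dict String (List (String × Int))) (c : String) :
    (l.foldl (fun d p => d.modify p.1 [] (fun v => step v p.2)) d).getD c []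
      = ((l.filter (fun p => p.1 == c)).map (fun p => p.2)).foldl step (d.getD c []) := by
  induction l generalizing d with
  | nil => rfl
  | cons p t ih =>
    rw [List.foldl_cons, ih, List.filter_cons]
    by_cases h : p.1 = c
    · simp [h]
    · have h' : (p.1 == c) = false := by simp [h]
      have h'' : ¬ c = p.1 := fun hc => h hc.symm
      simp [h', PySem.Dict.getD_modify, h'']

-- the items list of a grouping fold from empty: ordered-distinct keys paired with lookups
theorem pv_items_foldl_modify (l : List (String × (String × Int)))
    (step : List (String × Int) → (String × Int) → List (String × Int)) :
    (l.foldl (fun d p => d.modify p.1 [] (fun v => step v p.2))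
        (PySem.Dict.empty : PySem.Dict String (List (String × Int)))).items
      = (PySem.List.dedup (l.map (fun p => p.1))).map
          (fun u => (u, ((l.filter (fun p => p.1 == u)).map (fun p => p.2)).foldl step [])) := by
  have hkeys : (l.foldl (fun d p => d.modify p.1 [] (fun v => step v p.2))
        (PySem.Dict.empty : PySem.Dict String (List (String × Int)))).keys
      = PySem.List.dedup (l.map (fun p => p.1)) := by
    rw [PySem.Dict.keys_foldl_modify_key l (fun p => p.1) [] (fun _ p => (fun v => step v p.2)),
      PySem.Dict.keys_empty, PySem.Set.update_nil_left, PySem.List.dedup_eq_ofList]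
  have hnodup := PySem.Dict.nodup_keys_foldl_modify_key l (fun p => p.1) []
    (fun _ p => (fun v => step v p.2)) PySem.Dict.empty (by simp [PySem.Dict.keys_empty])
  rw [PySem.Dict.items_eq_map_keys _ hnodup [], hkeys]
  exact List.map_congr_left (fun u _ => by rw [pv_getD_foldl_modify_step]; rfl)

-- A's grouping dict, as an items list: each user with their raw (book, score) stream
theorem pv_items_A (l : List (String × (String × Int))) :
    (l.foldl (fun d p => d.modify p.1 [] (fun v => v ++ [p.2]))
        (PySem.Dict.empty : PySem.Dict String (List (String × Int)))).items
      = (PySem.List.dedup (l.map (fun p => p.1))).map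
          (fun u => (u, (l.filter (fun p => p.1 == u)).map (fun p => p.2))) := by
  simpa only [PySem.List.foldl_append_singleton_eq_self, List.nil_append]
    using pv_items_foldl_modify l (fun v y => v ++ [y])

-- B's grouping dict, as an items list: each user with their stream already sorted
theorem pv_items_B (l : List (String × (String × Int))) :
    (l.foldl (fun d p => d.modify p.1 []
        (fun v => PySem.List.insert v ((pvInsPos v p.2.2 : Nat) : Int) (p.2.1, p.2.2)))
        (PySem.Dict.empty : PySem.Dict String (List (String × Int)))).items
      = (PySem.List.dedup (l.map (fun p => p.1))).map
          (fun u => (u, PySem.List.sorted ((l.filter (fun p => p.1 == u)).map (fun p => p.2))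
              (fun x => x.2) true)) := by
  simpa only [pv_foldl_step_eq_sorted]
    using pv_items_foldl_modify l
      (fun v y => PySem.List.insert v ((pvInsPos v y.2 : Nat) : Int) (y.1, y.2))

-- dict(pairs) is the fold of single inserts
theorem pv_ofList_eq_foldl (l : List ((String × String) × Int)) :
    (PySem.Dict.ofList l : PySem.Dict (String × String) Int)
      = l.foldl (fun d p => d.insert p.1 p.2) PySem.Dict.empty := rfl

-- A's nested per-user insert loops = one insert fold over the flattened prediction stream
theorem pv_A_nested (L : List (String × List (String × Int)))
    (pred : PySem.Dict (String × String) Int) :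
    L.foldl
      (fun pred ui =>
        let items := PySem.List.sorted ui.2 (fun x => x.2) true
        let threshold : Int := (PySem.List.pyGetD items (PySem.Int.floordiv (items.length : Int) 2) ("", 0)).2
        items.foldl (fun pred bs => pred.insert (ui.1, bs.1) (if threshold < bs.2 then (1:Int) else 0)) pred)
      pred
    = (L.flatMap (fun ui =>
        let items := PySem.List.sorted ui.2 (fun x => x.2) true
        let threshold : Int := (PySem.List.pyGetD items (PySem.Int.floordiv (items.length : Int) 2) ("", 0)).2
        items.map (fun bs => ((ui.1, bs.1), if threshold < bs.2 then (1:Int) else 0)))).foldl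
        (fun d p => d.insert p.1 p.2) pred := by
  induction L generalizing pred with
  | nil => rfl
  | cons ui t ih =>
    simp only [List.foldl_cons, List.flatMap_cons, List.foldl_append, List.foldl_map, ih]

-- B's append loops = the flattened prediction stream
theorem pv_B_out (L : List (String × List (String × Int)))
    (acc : List ((String × String) × Int)) :
    L.foldl
      (fun out ui =>
        let threshold : Int := (ui.2.getD (ui.2.length / 2) ("", 0)).2
        ui.2.foldl (fun out bs => out ++ [((ui.1, bs.1), if threshold < bs.2 then (1:Int) else 0)]) out)
      acc
    = acc ++ L.flatMap (fun ui =>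
        let threshold : Int := (ui.2.getD (ui.2.length / 2) ("", 0)).2
        ui.2.map (fun bs => ((ui.1, bs.1), if threshold < bs.2 then (1:Int) else 0))) := by
  simp only [PySem.List.foldl_append_singleton_eq_map]
  rw [PySem.List.foldl_append_eq_flatMap]

-- A's and B's thresholds agree: items[len(items)//2] via pyGetD = getD at len/2
theorem pv_threshold_eq (items : List (String × Int)) :
    PySem.List.pyGetD items (PySem.Int.floordiv (items.length : Int) 2) ("", 0)
      = items.getD (items.length / 2) ("", 0) := by
  have h2 : (2 : Int) = ((2 : Nat) : Int) := rfl
  rw [h2, show ((items.length : Nat) : Int) = (items.length : Int) from rfl,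
    PySem.Int.floordiv_natCast, PySem.List.pyGetD_natCast]

theorem threshold_predictions_spec_aux (pairs : List (String × String)) (scores : List Int) :
    threshold_predictions pairs scores = threshold_predictions_alt pairs scores := by
  simp only [threshold_predictions, threshold_predictions_alt]
  have hA : (pairs.zip scores).foldl
      (fun d x => d.modify x.1.1 [] (fun l => l ++ [(x.1.2, x.2)]))
      (PySem.Dict.empty : PySem.Dict String (List (String × Int)))
      = ((pairs.zip scores).map (fun x => (x.1.1, (x.1.2, x.2)))).foldl
          (fun d p => d.modify p.1 [] (fun v => v ++ [p.2])) PySem.Dict.empty :=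
    (List.foldl_map (f := fun x : (String × String) × Int => (x.1.1, (x.1.2, x.2)))
      (g := fun (d : PySem.Dict String (List (String × Int))) p =>
        d.modify p.1 [] (fun v => v ++ [p.2]))).symm
  have hB : (pairs.zip scores).foldl
      (fun g x => g.modify x.1.1 []
        (fun items => PySem.List.insert items ((pvInsPos items x.2 : Nat) : Int) (x.1.2, x.2)))
      (PySem.Dict.empty : PySem.Dict String (List (String × Int)))
      = ((pairs.zip scores).map (fun x => (x.1.1, (x.1.2, x.2)))).foldl
          (fun d p => d.modify p.1 []
            (fun v => PySem.List.insert v ((pvInsPos v p.2.2 : Nat) : Int) (p.2.1, p.2.2)))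
          PySem.Dict.empty :=
    (List.foldl_map (f := fun x : (String × String) × Int => (x.1.1, (x.1.2, x.2)))
      (g := fun (d : PySem.Dict String (List (String × Int))) p =>
        d.modify p.1 [] (fun v => PySem.List.insert v ((pvInsPos v p.2.2 : Nat) : Int) (p.2.1, p.2.2)))).symm
  rw [hA, hB, pv_items_A, pv_items_B, pv_A_nested, ← pv_ofList_eq_foldl, pv_B_out,
    List.nil_append, List.flatMap_map, List.flatMap_map]
  refine congrArg (fun l : List ((String × String) × Int) =>
    (PySem.Dict.ofList l).items.map (fun p => (p.1.1, p.1.2, p.2))) ?_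
  refine List.flatMap_congr (fun u _ => ?_)
  simp only [pv_threshold_eq]

-- ===== VERDICT (by name: the statement is the Claim_ definition above) =====
theorem threshold_predictions_spec : Claim_equal_threshold_predictions := by
  intro pairs scores _
  show _ = _
  exact threshold_predictions_spec_aux pairs scores
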